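-- pv_equiv track=rewrite | github.com/Aryudesu/ABC | ABC/300_399/386/B.py | calc
-- ===== SOURCE A (Python) =====
-- def calc(S):
--     count = 0
--     f = False
--     for s in S:
--         if s != "0":
--             if f:
--                 count += 1
--                 f = False
--             count += 1
--         else:
--             if f:
--                 count += 1
--                 f = False
--             else:
--                 f = True
--     if f:
--         count += 1
--     return count
-- ===== SOURCE B (Python) =====
-- def calc(S):
--     total = 0
--     i = 0
--     n = len(S)
--     while i < n:
--         j = i
--         while j < n and (S[j] == "0") == (S[i] == "0"):
--             j += 1
--         run = j - i
--         total += (run + 1) // 2 if S[i] == "0" else run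
--         i = j
--     return total
-- ===== Notes on version B (the rewrite author's own statement) =====
-- stated objective: alternative
-- what changed: Replaced the per-character pending-zero flag automaton with a run-length pass: scan maximal runs of equal key (zero vs non-zero) and add ceil(k/2) for a zero run of length k, k for a non-zero run.
import Mathlib
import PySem

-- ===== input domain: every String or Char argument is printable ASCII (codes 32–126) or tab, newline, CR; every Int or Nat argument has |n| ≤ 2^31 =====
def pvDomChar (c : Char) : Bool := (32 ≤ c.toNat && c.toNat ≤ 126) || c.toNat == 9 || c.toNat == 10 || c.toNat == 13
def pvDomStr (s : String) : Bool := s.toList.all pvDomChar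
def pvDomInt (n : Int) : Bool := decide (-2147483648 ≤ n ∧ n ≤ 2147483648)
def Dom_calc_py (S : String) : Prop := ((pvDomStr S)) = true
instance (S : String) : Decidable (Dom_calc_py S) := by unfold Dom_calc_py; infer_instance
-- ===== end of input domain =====

-- B replaces A's per-character pending-zero flag automaton by a run-length scan over maximal
-- runs of equal key (zero vs non-zero): ceil(k/2) per zero run, k per non-zero run (alternative decomposition, same cost).

-- ===== PORT A =====
-- A's loop over S with state (count, f); the trailing 'if f: count += 1' is the [] case
def calcGo : List Char → Int → Bool → Int
  | [], count, f => if f then count + 1 else count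
  | s :: t, count, f =>
    if s ≠ '0' then
      calcGo t ((if f then count + 1 else count) + 1) false
    else
      if f then calcGo t (count + 1) false
      else calcGo t count true

def calc_py (S : String) : Int := calcGo S.toList 0 false

-- ===== PORT B =====
-- B's outer while loop: take the maximal run sharing the head's key (c == '0'), add its presses, recurse on the rest
def calcAltGo : List Char → Int
  | [] => 0
  | c :: t =>
    let run := t.takeWhile (fun d => (d == '0') == (c == '0'))
    let rest := t.dropWhile (fun d => (d == '0') == (c == '0'))
    (if c == '0' then ((run.length : Int) + 1 + 1) / 2 else (run.length : Int) + 1) + calcAltGo rest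
termination_by l => l.length
decreasing_by
  exact Nat.lt_succ_of_le (List.length_dropWhile_le _ _)

def calc_py_alt (S : String) : Int := calcAltGo S.toList

-- ===== PRECONDITION & SPEC =====
def Spec_calc_py (S : String) (out : Int) : Prop := out = calc_py_alt S
instance (S : String) (out : Int) : Decidable (Spec_calc_py S out) := by unfold Spec_calc_py; infer_instance

-- ===== CLAIM (what is proved, stated in full; the proofs are below) =====
def Claim_equal_calc_py : Prop := ∀ (S : String), Dom_calc_py S → Spec_calc_py S (calc_py S)

-- ===== LEMMAS AND PROOFS =====

theorem calcGo_shift (t : List Char) : ∀ (c : Int) (f : Bool),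
    calcGo t c f = c + calcGo t 0 f := by
  induction t with
  | nil => intro c f; cases f <;> simp [calcGo]
  | cons s t ih =>
    intro c f
    simp only [calcGo]
    split_ifs with h1 h2
    · rw [ih (c+1+1) false, ih (0+1+1) false]; ring
    · rw [ih (c+1) false, ih (0+1) false]; ring
    · rw [ih (c+1) false, ih (0+1) false]; ring
    · rw [ih c true]

theorem calcGo_zeroRun (k : Nat) : ∀ (rest : List Char),
    (∀ c ∈ rest.head?, c ≠ '0') →
    calcGo (List.replicate k '0' ++ rest) 0 false
      = ((k : Int) + 1) / 2 + calcGo rest 0 false := by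
  induction k using Nat.strong_induction_on with
  | _ k ih =>
    intro rest hrest
    match k with
    | 0 => simp
    | 1 =>
      simp only [List.replicate, List.cons_append, List.nil_append]
      match rest with
      | [] => simp [calcGo]
      | c :: u =>
        have hc : c ≠ '0' := hrest c (by simp)
        simp [calcGo, hc, calcGo_shift u 2 false, calcGo_shift u 1 false]
        ring
    | (m+2) =>
      have h1 : List.replicate (m+2) '0' ++ rest
          = '0' :: '0' :: (List.replicate m '0' ++ rest) := by
        simp [List.replicate]
      rw [h1]
      have h2 : calcGo ('0' :: '0' :: (List.replicate m '0' ++ rest)) 0 false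
          = 1 + calcGo (List.replicate m '0' ++ rest) 0 false := by
        simp [calcGo, calcGo_shift (List.replicate m '0' ++ rest) 1 false]
      rw [h2, ih m (by omega) rest hrest]
      push_cast
      omega

theorem calcGo_nonzeroRun (run : List Char) (h : ∀ c ∈ run, c ≠ '0') (rest : List Char) :
    calcGo (run ++ rest) 0 false = (run.length : Int) + calcGo rest 0 false := by
  induction run with
  | nil => simp
  | cons c u ih =>
    have hc : c ≠ '0' := h c (by simp)
    simp only [List.cons_append, calcGo, if_pos hc]
    rw [show ((if false = true then (0:Int) + 1 else 0) + 1) = 1 by simp,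
        calcGo_shift (u ++ rest) 1 false, ih (fun d hd => h d (by simp [hd]))]
    simp only [List.length_cons]
    push_cast
    ring

theorem dropWhile_head_not (p : Char → Bool) (l : List Char) :
    ∀ d ∈ (l.dropWhile p).head?, ¬ p d := by
  induction l with
  | nil => simp
  | cons a u ih =>
    by_cases ha : p a
    · simpa [List.dropWhile_cons_of_pos ha] using ih
    · simp [List.dropWhile, ha]

theorem main_equiv_aux (n : Nat) : ∀ (l : List Char), l.length ≤ n → calcGo l 0 false = calcAltGo l := by
  induction n with
  | zero =>
    intro l h
    have : l = [] := List.eq_nil_of_length_eq_zero (Nat.le_zero.mp h)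
    subst this
    simp [calcGo, calcAltGo]
  | succ n ih =>
    intro l h
    match l with
    | [] => simp [calcGo, calcAltGo]
    | c :: t =>
      rw [calcAltGo]
      set p : Char → Bool := fun d => (d == '0') == (c == '0') with hp
      have hrest_len : (t.dropWhile p).length ≤ n :=
        le_trans (List.length_dropWhile_le _ _) (Nat.succ_le_succ_iff.mp h)
      have hrest := ih (t.dropWhile p) hrest_len
      have hdecomp : c :: t = (c :: t.takeWhile p) ++ t.dropWhile p := by
        simp [List.takeWhile_append_dropWhile]
      have hhead : ∀ d ∈ (t.dropWhile p).head?, ¬ p d := dropWhile_head_not p t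
      by_cases hc : c = '0'
      · have hall : c :: t.takeWhile p = List.replicate ((t.takeWhile p).length + 1) '0' := by
          rw [List.eq_replicate_iff]
          constructor
          · simp
          · intro d hd
            rcases List.mem_cons.mp hd with h1 | h1
            · rw [h1, hc]
            · have := List.mem_takeWhile_imp h1
              simp only [hp, hc] at this
              simpa using this
        rw [hdecomp, hall, calcGo_zeroRun ((t.takeWhile p).length + 1) (t.dropWhile p)
              (by intro d hd; have := hhead d hd; simp [hp, hc] at this; exact this),
            hrest]
        simp [hc]
      · have hall : ∀ d ∈ c :: t.takeWhile p, d ≠ '0' := by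
          intro d hd
          rcases List.mem_cons.mp hd with h1 | h1
          · rw [h1]; exact hc
          · have := List.mem_takeWhile_imp h1
            simp only [hp] at this
            simp only [beq_iff_eq] at this
            intro hd0
            exact hc (by simpa [hd0] using this.symm)
        rw [hdecomp, calcGo_nonzeroRun (c :: t.takeWhile p) hall (t.dropWhile p), hrest]
        simp [hc]

-- ===== VERDICT (by name: the statement is the Claim_ definition above) =====
theorem calc_py_spec : Claim_equal_calc_py := by
  intro S _
  unfold Spec_calc_py calc_py calc_py_alt
  exact main_equiv_aux S.toList.length S.toList le_rfl
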